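-- pv_equiv track=rewrite | github.com/DoisDedin/GPUAndroidUp | generate_transfer_compute_summary.py | determine_device_order
-- ===== SOURCE A (Python) =====
-- from typing import List
--
-- KNOWN_DEVICE_ORDER = [
--     "Galaxy S21 (09-12)",
--     "Moto G04s (09-12)",
--     "Moto G84 (09-12)",
--     "Galaxy S21 (30-11)",
--     "Moto G04s (30-11)",
--     "Moto G84 (30-11)",
-- ]
--
-- def determine_device_order(devices: List[str]) -> List[str]:
--     order: List[str] = []
--     for known in KNOWN_DEVICE_ORDER:
--         if known in devices:
--             order.append(known)
--     for device in sorted(devices):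
--         if device not in order:
--             order.append(device)
--     return order
-- ===== SOURCE B (Python) =====
-- from typing import List
--
-- KNOWN_DEVICE_ORDER = [
--     "Galaxy S21 (09-12)",
--     "Moto G04s (09-12)",
--     "Moto G84 (09-12)",
--     "Galaxy S21 (30-11)",
--     "Moto G04s (30-11)",
--     "Moto G84 (30-11)",
-- ]
--
-- def determine_device_order(devices: List[str]) -> List[str]:
--     priority = {name: i for i, name in enumerate(KNOWN_DEVICE_ORDER)}
--     fallback = len(KNOWN_DEVICE_ORDER)
--     return sorted(set(devices), key=lambda d: (priority.get(d, fallback), d))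
-- ===== Notes on version B (the rewrite author's own statement) =====
-- stated objective: faster
-- what changed: A's two filter passes with a linear 'not in order' scan inside the second loop are replaced by one keyed sort of the unique device set, using a priority dict built once (known names by index, unknowns share the fallback index and tie-break alphabetically).
import Mathlib
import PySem

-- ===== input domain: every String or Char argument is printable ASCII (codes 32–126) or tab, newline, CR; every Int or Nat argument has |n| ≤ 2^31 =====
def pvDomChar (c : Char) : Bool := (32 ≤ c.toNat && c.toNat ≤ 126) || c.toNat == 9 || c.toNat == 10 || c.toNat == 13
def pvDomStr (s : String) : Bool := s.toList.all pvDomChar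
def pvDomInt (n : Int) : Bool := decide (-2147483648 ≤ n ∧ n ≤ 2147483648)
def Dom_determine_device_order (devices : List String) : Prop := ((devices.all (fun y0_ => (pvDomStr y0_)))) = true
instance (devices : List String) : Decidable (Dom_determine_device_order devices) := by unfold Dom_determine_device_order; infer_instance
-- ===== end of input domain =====

-- B replaces A's two membership-filter passes with a single keyed sort of the unique devices (priority index, then name); same return value, simpler code.

def KNOWN_DEVICE_ORDER : List String := [
  "Galaxy S21 (09-12)",
  "Moto G04s (09-12)",
  "Moto G84 (09-12)",
  "Galaxy S21 (30-11)",
  "Moto G04s (30-11)",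
  "Moto G84 (30-11)"
]

-- ===== PORT A =====
def determine_device_order (devices : List String) : List String :=
  let order : List String :=
    KNOWN_DEVICE_ORDER.foldl
      (fun order known => if devices.contains known then order ++ [known] else order) []
  (PySem.List.sorted devices (fun d => d) false).foldl
    (fun order device => if !(order.contains device) then order ++ [device] else order) order

-- ===== PORT B =====
def determine_device_order_alt (devices : List String) : List String :=
  let priority : PySem.Dict String Int :=
    (PySem.List.enumerate KNOWN_DEVICE_ORDER 0).foldl
      (fun d p => d.insert p.2 p.1) PySem.Dict.empty
  let fallback : Int := (KNOWN_DEVICE_ORDER.length : Int)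
  PySem.List.sorted2 (PySem.Set.ofList devices)
    (fun d => priority.getD d fallback) (fun d => d) false

-- ===== PRECONDITION & SPEC =====
def Spec_determine_device_order (devices : List String) (out : List String) : Prop := out = determine_device_order_alt devices
instance (devices : List String) (out : List String) : Decidable (Spec_determine_device_order devices out) := by unfold Spec_determine_device_order; infer_instance

-- ===== CLAIM (what is proved, stated in full; the proofs are below) =====
def Claim_equal_determine_device_order : Prop := ∀ (devices : List String), Dom_determine_device_order devices → Spec_determine_device_order devices (determine_device_order devices)

-- ===== LEMMAS AND PROOFS =====

-- the priority dict B builds, and B's sort key seen as a lexicographic pair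
def prioD : PySem.Dict String Int :=
  (PySem.List.enumerate KNOWN_DEVICE_ORDER 0).foldl
    (fun d p => d.insert p.2 p.1) PySem.Dict.empty

def pkey (d : String) : Lex (Int × String) :=
  toLex (prioD.getD d (KNOWN_DEVICE_ORDER.length : Int), d)

-- the known devices that are present, in KNOWN order (A's first loop)
def KP (devices : List String) : List String :=
  KNOWN_DEVICE_ORDER.filter (fun k => devices.contains k)

-- the unknown unique devices, alphabetically
def UNK (devices : List String) : List String :=
  PySem.List.sorted ((PySem.Set.ofList devices).filter (fun d => !KNOWN_DEVICE_ORDER.contains d)) (fun d => d) false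

lemma sorted2_eq_sorted_lex {α κ₁ κ₂ : Type} [LinearOrder κ₁] [LinearOrder κ₂] (xs : List α) (k1 : α → κ₁) (k2 : α → κ₂) :
    PySem.List.sorted2 xs k1 k2 false = PySem.List.sorted xs (fun x => toLex (k1 x, k2 x)) false := by
  rw [PySem.List.sorted_eq_foldl_insertBy]
  unfold PySem.List.sorted2
  simp only [if_neg (by decide : ¬ (false = true))]
  have hfn : (fun (a b : α) => decide (k1 a < k1 b) || !decide (k1 b < k1 a) && decide (k2 a < k2 b))
      = fun a b => decide (toLex (k1 a, k2 a) < toLex (k1 b, k2 b)) := by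
    funext a b
    rcases lt_trichotomy (k1 a) (k1 b) with h | h | h
    · simp [Prod.Lex.lt_iff, h]
    · simp [Prod.Lex.lt_iff, h]
    · simp [Prod.Lex.lt_iff, h, not_lt_of_gt h, h.ne']
  rw [hfn]

lemma foldl_add_eq (xs : List String) (s : List String) :
    xs.foldl PySem.Set.add s = s ++ (xs.foldl PySem.Set.add []).filter (fun x => !s.contains x) := by
  induction xs generalizing s with
  | nil => simp
  | cons x xs ih =>
    simp only [List.foldl_cons]
    rw [ih (PySem.Set.add s x), ih (PySem.Set.add [] x)]
    have hadd0 : PySem.Set.add ([] : List String) x = [x] := by simp [PySem.Set.add]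
    rw [hadd0, List.filter_append, List.filter_filter]
    by_cases hx : x ∈ s
    · have hadd : PySem.Set.add s x = s := by simp [PySem.Set.add, hx]
      rw [hadd]
      have h1 : List.filter (fun a => !s.contains a) [x] = [] := by simp [hx]
      rw [h1]
      congr 1
      apply List.filter_congr
      intro y _
      by_cases hy : y = x
      · subst hy; simp [hx]
      · simp [hy]
    · have hadd : PySem.Set.add s x = s ++ [x] := by simp [PySem.Set.add, hx]
      rw [hadd]
      have h1 : List.filter (fun a => !s.contains a) [x] = [x] := by simp [hx]
      rw [h1, List.append_assoc]
      congr 1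
      apply congrArg (fun t => [x] ++ t)
      apply List.filter_congr
      intro y _
      by_cases hy : y = x
      · subst hy; simp
      · simp [hy]

lemma foldl_add_sublist (xs : List String) (s : List String) :
    List.Sublist (xs.foldl PySem.Set.add s) (s ++ xs) := by
  induction xs generalizing s with
  | nil => simp
  | cons x xs ih =>
    simp only [List.foldl_cons]
    refine (ih (PySem.Set.add s x)).trans ?_
    by_cases hx : x ∈ s
    · have hadd : PySem.Set.add s x = s := by simp [PySem.Set.add, hx]
      rw [hadd]
      exact List.Sublist.append_left (List.sublist_cons_self x xs) s
    · have hadd : PySem.Set.add s x = s ++ [x] := by simp [PySem.Set.add, hx]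
      rw [hadd]
      simp

lemma ofList_sublist (xs : List String) : List.Sublist (PySem.Set.ofList xs) xs := by
  have := foldl_add_sublist xs []
  simpa [PySem.Set.ofList_eq_foldl] using this

-- A's second-loop body is Set.add
lemma loop2_is_add : (fun (order : List String) device => if !(order.contains device) then order ++ [device] else order) = PySem.Set.add := by
  funext s x
  by_cases h : s.contains x <;> simp [PySem.Set.add, h]

-- A computes: present knowns in KNOWN order, then first occurrences of sorted devices not already listed
lemma A_char (devices : List String) :
    determine_device_order devices
      = KP devices ++ (PySem.Set.ofList (PySem.List.sorted devices (fun d => d) false)).filter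
          (fun x => !(KP devices).contains x) := by
  unfold determine_device_order
  rw [PySem.List.foldl_append_if_eq_filter, loop2_is_add, foldl_add_eq]
  rfl

lemma B_char (devices : List String) :
    determine_device_order_alt devices = PySem.List.sorted (PySem.Set.ofList devices) pkey false := by
  unfold determine_device_order_alt
  exact sorted2_eq_sorted_lex (PySem.Set.ofList devices) _ _

lemma nodup_known : KNOWN_DEVICE_ORDER.Nodup := by decide

lemma notKnown_prio {d : String} (hd : d ∉ KNOWN_DEVICE_ORDER) :
    prioD.getD d (KNOWN_DEVICE_ORDER.length : Int) = (KNOWN_DEVICE_ORDER.length : Int) := by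
  simp only [KNOWN_DEVICE_ORDER, List.mem_cons, not_or] at hd
  obtain ⟨h1, h2, h3, h4, h5, h6, -⟩ := hd
  have hp : prioD = PySem.Dict.mk [("Galaxy S21 (09-12)", 0), ("Moto G04s (09-12)", 1),
      ("Moto G84 (09-12)", 2), ("Galaxy S21 (30-11)", 3), ("Moto G04s (30-11)", 4),
      ("Moto G84 (30-11)", 5)] := by decide
  rw [hp]
  simp [PySem.Dict.getD, PySem.Dict.get?,
    (Ne.symm h1), (Ne.symm h2), (Ne.symm h3), (Ne.symm h4), (Ne.symm h5), (Ne.symm h6)]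

lemma mem_KP {devices : List String} {x : String} :
    x ∈ KP devices ↔ x ∈ KNOWN_DEVICE_ORDER ∧ x ∈ devices := by
  simp [KP]

lemma nodup_UNK (devices : List String) : (UNK devices).Nodup := by
  have h := (PySem.List.sorted_perm ((PySem.Set.ofList devices).filter (fun d => !KNOWN_DEVICE_ORDER.contains d)) (fun d => d) false)
  exact h.nodup_iff.mpr ((PySem.Set.nodup_ofList devices).filter _)

lemma pairwise_lt_UNK (devices : List String) : (UNK devices).Pairwise (· < ·) := by
  have hle := PySem.List.sorted_pairwise ((PySem.Set.ofList devices).filter (fun d => !KNOWN_DEVICE_ORDER.contains d)) (fun d => d)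
  have hnd := nodup_UNK devices
  exact ((hle.and hnd).imp (fun h => lt_of_le_of_ne h.1 h.2))

lemma mem_UNK {devices : List String} {x : String} :
    x ∈ UNK devices ↔ x ∈ devices ∧ x ∉ KNOWN_DEVICE_ORDER := by
  simp [UNK, PySem.List.mem_sorted, PySem.Set.mem_ofList]

-- A's value is KP ++ UNK
lemma A_eq_C (devices : List String) :
    determine_device_order devices = KP devices ++ UNK devices := by
  rw [A_char]
  congr 1
  -- replace the "not already listed" filter by "not known", then name the sorted order
  have hstep : (PySem.Set.ofList (PySem.List.sorted devices (fun d => d) false)).filter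
      (fun x => !(KP devices).contains x)
      = (PySem.Set.ofList (PySem.List.sorted devices (fun d => d) false)).filter
      (fun x => !KNOWN_DEVICE_ORDER.contains x) := by
    apply List.filter_congr
    intro y hy
    have hyd : y ∈ devices := by
      have := (PySem.Set.mem_ofList _ y).mp hy
      exact (PySem.List.mem_sorted devices (fun d => d) false y).mp this
    by_cases hk : y ∈ KNOWN_DEVICE_ORDER
    · simp [mem_KP.mpr ⟨hk, hyd⟩, hk]
    · have : y ∉ KP devices := fun hc => hk (mem_KP.mp hc).1
      simp [this, hk]
  rw [hstep]
  -- UNK is sorted(filter(ofList devices)); the filtered ofList(sorted devices) is that same sort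
  unfold UNK
  refine (PySem.List.sorted_eq_of_perm_of_pairwise_lt _ _ _ ?_ ?_).symm
  · apply List.Perm.filter
    rw [List.perm_ext_iff_of_nodup (PySem.Set.nodup_ofList _) (PySem.Set.nodup_ofList _)]
    intro a
    simp [PySem.Set.mem_ofList, PySem.List.mem_sorted]
  · apply List.Pairwise.filter
    have hle : (PySem.Set.ofList (PySem.List.sorted devices (fun d => d) false)).Pairwise (· ≤ ·) :=
      (PySem.List.sorted_pairwise devices (fun d => d)).sublist (ofList_sublist _)
    exact ((hle.and (PySem.Set.nodup_ofList _)).imp (fun h => lt_of_le_of_ne h.1 h.2))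

lemma known_pairwise_pkey : KNOWN_DEVICE_ORDER.Pairwise (fun a b => pkey a < pkey b) := by
  decide

lemma known_pkey_lt {a : String} (ha : a ∈ KNOWN_DEVICE_ORDER) :
    prioD.getD a (KNOWN_DEVICE_ORDER.length : Int) < (KNOWN_DEVICE_ORDER.length : Int) := by
  fin_cases ha <;> decide

-- B's value is KP ++ UNK
lemma B_eq_C (devices : List String) :
    determine_device_order_alt devices = KP devices ++ UNK devices := by
  rw [B_char]
  apply PySem.List.sorted_eq_of_perm_of_pairwise_lt
  · -- permutation: knowns-present ++ sorted unknowns ~ unique devices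
    have hKP : (KP devices).Perm ((PySem.Set.ofList devices).filter (fun d => KNOWN_DEVICE_ORDER.contains d)) := by
      unfold KP
      rw [List.perm_ext_iff_of_nodup (nodup_known.filter _) ((PySem.Set.nodup_ofList _).filter _)]
      intro a
      simp [PySem.Set.mem_ofList, and_comm]
    have hUNK : (UNK devices).Perm ((PySem.Set.ofList devices).filter (fun d => !KNOWN_DEVICE_ORDER.contains d)) :=
      PySem.List.sorted_perm _ _ _
    exact (hKP.append hUNK).trans (List.filter_append_perm _ _)
  · -- strictly increasing under (priority, name)
    rw [List.pairwise_append]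
    refine ⟨known_pairwise_pkey.filter _, ?_, ?_⟩
    · have := pairwise_lt_UNK devices
      refine List.Pairwise.imp_of_mem ?_ this
      intro a b ha hb hab
      have hpa := notKnown_prio (mem_UNK.mp ha).2
      have hpb := notKnown_prio (mem_UNK.mp hb).2
      simp [pkey, Prod.Lex.lt_iff, hpa, hpb, hab]
    · intro a ha b hb
      have haK : a ∈ KNOWN_DEVICE_ORDER := (mem_KP.mp ha).1
      have hpb := notKnown_prio (mem_UNK.mp hb).2
      have hpa := known_pkey_lt haK
      simp [pkey, Prod.Lex.lt_iff, hpb]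
      exact Or.inl hpa

-- ===== VERDICT (by name: the statement is the Claim_ definition above) =====
theorem determine_device_order_spec : Claim_equal_determine_device_order := by
  intro devices _
  unfold Spec_determine_device_order
  rw [A_eq_C, B_eq_C]
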